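-- pv_equiv track=rewrite | github.com/phongpg284/leetcode | Matrix/Check if Grid Satisfies Conditions/solution.py | satisfiesConditions
-- ===== SOURCE A (Python) =====
-- from typing import List
--
-- def satisfiesConditions(grid: List[List[int]]) -> bool:
--     m, n = len(grid), len(grid[0])
--     for i in range(m):
--         for j in range(n):
--             if j + 1 < n and grid[i][j + 1] == grid[i][j]:
--                 return False
--             if i + 1 < m and grid[i + 1][j] != grid[i][j]:
--                 return False
--     return True
-- ===== SOURCE B (Python) =====
-- from typing import List
--
-- def satisfiesConditions(grid: List[List[int]]) -> bool:
--     # Columns are constant iff every row agrees elementwise with the first row;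
--     # the adjacent-distinct row condition then only needs checking on the first row.
--     first = grid[0]
--     cols_ok = all(all(x == y for x, y in zip(first, row)) for row in grid)
--     rows_ok = all(a != b for a, b in zip(first, first[1:]))
--     return cols_ok and rows_ok
-- ===== Notes on version B (the rewrite author's own statement) =====
-- stated objective: simpler
-- what changed: Instead of A's interleaved index-driven double loop over all cells, B checks that every row agrees elementwise (zip) with the first row -- which is equivalent to the columns being constant -- and checks the adjacent-distinct condition on the first row only.
-- outside the precondition, e.g. on satisfiesConditions([[1, 1], [1]]): A returns False, B returns False; on satisfiesConditions([[1, 2], [1]]): A raises IndexError, B returns True; on satisfiesConditions([]): A raises IndexError, B raises IndexError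
import Mathlib
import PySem

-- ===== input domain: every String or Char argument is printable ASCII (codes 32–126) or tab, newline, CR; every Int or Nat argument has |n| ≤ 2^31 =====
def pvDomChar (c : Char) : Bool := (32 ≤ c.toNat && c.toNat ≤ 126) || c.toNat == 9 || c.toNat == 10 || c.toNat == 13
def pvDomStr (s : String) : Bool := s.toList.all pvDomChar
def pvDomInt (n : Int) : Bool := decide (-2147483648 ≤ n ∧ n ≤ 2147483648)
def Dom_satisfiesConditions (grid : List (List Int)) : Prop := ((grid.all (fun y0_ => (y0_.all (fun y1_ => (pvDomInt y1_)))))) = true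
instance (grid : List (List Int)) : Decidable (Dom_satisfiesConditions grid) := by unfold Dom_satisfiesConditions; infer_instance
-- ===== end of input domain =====

-- B replaces A's interleaved index-driven double loop by comparing every row elementwise
-- with the first row and checking adjacent distinctness on the first row only (objective: simpler).

-- ===== PORT A =====
-- grid[i][j] as A reads it; the defaults are never reached on inputs satisfying Pre_.
def pvCell (grid : List (List Int)) (i j : Int) : Int :=
  PySem.List.pyGetD (PySem.List.pyGetD grid i []) j 0

def satisfiesConditions (grid : List (List Int)) : Bool :=
  let m : Int := grid.length
  let n : Int := (PySem.List.pyGetD grid 0 []).length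
  (PySem.List.pyRange 0 m 1).all fun i =>
    (PySem.List.pyRange 0 n 1).all fun j =>
      (if j + 1 < n then !(pvCell grid i (j + 1) == pvCell grid i j) else true) &&
      (if i + 1 < m then pvCell grid (i + 1) j == pvCell grid i j else true)

-- ===== PORT B =====
def satisfiesConditions_alt (grid : List (List Int)) : Bool :=
  let first := PySem.List.pyGetD grid 0 []
  (grid.all fun row => (first.zip row).all fun p => p.1 == p.2) &&
  ((first.zip first.tail).all fun p => !(p.1 == p.2))

-- ===== PRECONDITION & SPEC =====
-- Pre_ excludes the empty grid, on which both A and B raise IndexError, and grids having a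
-- row shorter than the first row: on those A raises IndexError whenever its scan reaches the
-- missing cell before a violating cell (and A's raising subset has no closed form; where A
-- does return there, it returns False, as does B).
def Pre_satisfiesConditions (grid : List (List Int)) : Prop :=
  grid ≠ [] ∧ ∀ row ∈ grid, (grid.headD []).length ≤ row.length
instance (grid : List (List Int)) : Decidable (Pre_satisfiesConditions grid) := by
  unfold Pre_satisfiesConditions; infer_instance

def pvWitness_satisfiesConditions : List (List Int) := [[1, 2], [1, 2]]

def Spec_satisfiesConditions (grid : List (List Int)) (out : Bool) : Prop := out = satisfiesConditions_alt grid
instance (grid : List (List Int)) (out : Bool) : Decidable (Spec_satisfiesConditions grid out) := by unfold Spec_satisfiesConditions; infer_instance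

-- ===== CLAIM (what is proved, stated in full; the proofs are below) =====
def Claim_equal_satisfiesConditions : Prop := ∀ (grid : List (List Int)), Dom_satisfiesConditions grid → Pre_satisfiesConditions grid → Spec_satisfiesConditions grid (satisfiesConditions grid)

-- ===== LEMMAS AND PROOFS =====

theorem pvIf_true {c : Prop} [Decidable c] {x : Bool} :
    ((if c then x else true) = true) ↔ (c → x = true) := by
  split_ifs with h <;> simp [h]

theorem pvGetD_mem {α : Type} (l : List α) (d : α) {a : Nat} (h : a < l.length) :
    l.getD a d ∈ l := by
  rw [List.getD_eq_getElem l d h]; exact List.getElem_mem h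

-- A is true iff no cell has an equal right neighbour and every cell equals the one below it.
theorem pvA_char (grid : List (List Int)) :
    satisfiesConditions grid = true ↔
      ∀ a < grid.length, ∀ b < (grid.getD 0 []).length,
        (b + 1 < (grid.getD 0 []).length →
          (grid.getD a []).getD (b + 1) 0 ≠ (grid.getD a []).getD b 0) ∧
        (a + 1 < grid.length →
          (grid.getD (a + 1) []).getD b 0 = (grid.getD a []).getD b 0) := by
  simp only [satisfiesConditions, pvCell, PySem.List.pyGetD_zero,
    PySem.List.pyRange_zero_natCast, List.all_map, List.all_eq_true, List.mem_range,
    Function.comp, pvIf_true, Bool.and_eq_true, ← Nat.cast_add_one, Nat.cast_lt,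
    PySem.List.pyGetD_natCast, Bool.not_eq_true', beq_eq_false_iff_ne, beq_iff_eq]

-- A zipped pair-by-pair agreement is agreement on the common prefix.
theorem pvZip_char (xs ys : List Int) :
    (∀ p ∈ xs.zip ys, p.1 = p.2) ↔
      ∀ k < min xs.length ys.length, xs.getD k 0 = ys.getD k 0 := by
  constructor
  · intro h k hk
    have hmem : (xs[k]'(by omega), ys[k]'(by omega)) ∈ xs.zip ys := by
      rw [List.mem_iff_getElem]
      exact ⟨k, by simp only [List.length_zip]; omega, by rw [List.getElem_zip]⟩
    have := h _ hmem
    rwa [List.getD_eq_getElem xs 0 (by omega), List.getD_eq_getElem ys 0 (by omega)]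
  · intro h p hp
    obtain ⟨k, hk, rfl⟩ := List.mem_iff_getElem.mp hp
    have hk' : k < min xs.length ys.length := by
      simpa only [List.length_zip] using hk
    have := h k hk'
    rw [List.getD_eq_getElem xs 0 (by omega), List.getD_eq_getElem ys 0 (by omega)] at this
    simpa only [List.getElem_zip] using this

-- B is true iff every row agrees with the first row where both are defined and the first
-- row has no equal adjacent pair.
theorem pvB_char (grid : List (List Int)) :
    satisfiesConditions_alt grid = true ↔
      (∀ row ∈ grid, ∀ k < min (grid.getD 0 []).length row.length,
        (grid.getD 0 []).getD k 0 = row.getD k 0) ∧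
      (∀ k, k + 1 < (grid.getD 0 []).length →
        (grid.getD 0 []).getD (k + 1) 0 ≠ (grid.getD 0 []).getD k 0) := by
  simp only [satisfiesConditions_alt, PySem.List.pyGetD_zero, Bool.and_eq_true,
    List.all_eq_true, Bool.not_eq_true', beq_eq_false_iff_ne, beq_iff_eq]
  refine and_congr (forall₂_congr fun row _ => pvZip_char _ _) ?_
  set first := grid.getD 0 [] with hf
  constructor
  · intro h k hk
    have hmem : (first[k]'(by omega), first.tail[k]'(by simp only [List.length_tail]; omega))
        ∈ first.zip first.tail := by
      rw [List.mem_iff_getElem]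
      exact ⟨k, by simp only [List.length_zip, List.length_tail]; omega,
        by rw [List.getElem_zip]⟩
    have hne := h _ hmem
    simp only [List.getElem_tail] at hne
    rw [List.getD_eq_getElem first 0 (by omega : k + 1 < first.length),
        List.getD_eq_getElem first 0 (by omega : k < first.length)]
    exact fun he => hne he.symm
  · intro h p hp
    obtain ⟨k, hk, rfl⟩ := List.mem_iff_getElem.mp hp
    have hk' : k + 1 < first.length := by
      simp only [List.length_zip, List.length_tail] at hk; omega
    have := h k hk'
    rw [List.getD_eq_getElem first 0 hk', List.getD_eq_getElem first 0 (by omega)] at this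
    simp only [List.getElem_zip, List.getElem_tail]
    exact fun he => this he.symm

-- ===== VERDICT (by name: the statement is the Claim_ definition above) =====
theorem satisfiesConditions_spec : Claim_equal_satisfiesConditions := by
  intro grid _ hpre
  obtain ⟨hne, hwide⟩ := hpre
  have hhead : grid.headD [] = grid.getD 0 [] := by cases grid <;> rfl
  rw [hhead] at hwide
  have hpos : 0 < grid.length := List.length_pos_iff.mpr hne
  have hlen : ∀ a, a < grid.length →
      (grid.getD 0 []).length ≤ (grid.getD a []).length :=
    fun a ha => hwide _ (pvGetD_mem grid [] ha)
  unfold Spec_satisfiesConditions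
  rw [Bool.eq_iff_iff, pvA_char, pvB_char]
  constructor
  · intro hA
    constructor
    · -- every row agrees with the first row on the common prefix
      have hcol : ∀ a, a < grid.length → ∀ b < (grid.getD 0 []).length,
          (grid.getD a []).getD b 0 = (grid.getD 0 []).getD b 0 := by
        intro a
        induction a with
        | zero => intro _ b _; rfl
        | succ a ih =>
          intro ha b hb
          have ha' : a < grid.length := by omega
          rw [(hA a ha' b hb).2 ha, ih ha' b hb]
      intro row hmem k hk
      obtain ⟨a, ha, rfl⟩ := List.mem_iff_getElem.mp hmem
      rw [← List.getD_eq_getElem grid [] ha] at hk ⊢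
      exact (hcol a ha k (by omega)).symm
    · -- first row has no equal adjacent pair
      intro k hk
      exact (hA 0 hpos k (by omega)).1 hk
  · intro ⟨hall, hadj⟩ a ha b hb
    have hga : ∀ b' < (grid.getD 0 []).length,
        (grid.getD a []).getD b' 0 = (grid.getD 0 []).getD b' 0 := by
      intro b' hb'
      exact (hall _ (pvGetD_mem grid [] ha) b' (by have := hlen a ha; omega)).symm
    constructor
    · intro hb1
      rw [hga _ hb1, hga _ hb]
      exact hadj b hb1
    · intro ha1
      have hga1 : (grid.getD (a + 1) []).getD b 0 = (grid.getD 0 []).getD b 0 :=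
        (hall _ (pvGetD_mem grid [] ha1) b (by have := hlen _ ha1; omega)).symm
      rw [hga1, hga _ hb]
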